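-- pv_equiv track=rewrite | github.com/SCU-SCST-SAST-MR/Learning-Materials | Python程序设计/2017-2/2017-2(by XuWeiwei).py | findMultiAlphaWords
-- ===== SOURCE A (Python) =====
-- def findMultiAlphaWords(wordlist,num):
--     wordResultLst=[]
--     newwordlist=wordlist[:]
--     for i in newwordlist:
--         k=i
--         a=list(k.lower())
--         for j in a:
--             if a.count(j)>=num:
--                 wordResultLst.append(i)
--                 break
--     return wordResultLst
-- ===== SOURCE B (Python) =====
-- def findMultiAlphaWords(wordlist, num):
--     result = []
--     for word in wordlist:
--         chars = sorted(word.lower())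
--         prev = None
--         run = 0
--         hit = False
--         for ch in chars:
--             run = run + 1 if ch == prev else 1
--             prev = ch
--             if run >= num:
--                 hit = True
--                 break
--         if hit:
--             result.append(word)
--     return result
-- ===== Notes on version B (the rewrite author's own statement) =====
-- stated objective: alternative
-- what changed: B sorts each word's lowercased characters and scans the sorted list once tracking the length of the current run of equal characters (groupby-style), instead of A's nested rescan calling list.count for every character.
import Mathlib
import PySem

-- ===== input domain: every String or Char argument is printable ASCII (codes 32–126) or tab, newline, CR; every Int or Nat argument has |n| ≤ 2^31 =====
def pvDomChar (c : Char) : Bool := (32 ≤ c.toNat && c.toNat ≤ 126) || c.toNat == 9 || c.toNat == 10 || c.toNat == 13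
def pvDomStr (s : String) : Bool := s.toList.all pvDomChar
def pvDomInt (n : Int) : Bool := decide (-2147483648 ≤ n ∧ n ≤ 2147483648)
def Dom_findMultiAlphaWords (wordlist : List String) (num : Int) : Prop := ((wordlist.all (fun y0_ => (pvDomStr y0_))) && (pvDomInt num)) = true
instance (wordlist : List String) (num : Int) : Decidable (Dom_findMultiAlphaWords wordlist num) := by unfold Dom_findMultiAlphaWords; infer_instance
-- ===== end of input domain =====

-- B sorts each word's lowercased characters and scans the sorted list once, tracking the
-- current run length (groupby-style), instead of A's per-character list.count rescans.

-- ===== PORT A =====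
-- inner 'for j in a: if a.count(j)>=num: append; break' — returns whether the break fired
def aCheck (rest : List Char) (a : List Char) (num : Int) : Bool :=
  match rest with
  | [] => false
  | j :: t => if num ≤ (PySem.List.count a j : Int) then true else aCheck t a num

def findMultiAlphaWords (wordlist : List String) (num : Int) : List String :=
  let newwordlist := PySem.List.slice wordlist none none
  newwordlist.foldl (fun wordResultLst i =>
    let a := (PySem.Str.lower i).toList
    if aCheck a a num then wordResultLst ++ [i] else wordResultLst) []

-- ===== PORT B =====
-- Source B's inner loop: walk the sorted characters with (prev, run); 'hit' is the return value.
-- Python compares 1-char strings; on the ASCII domain that is exactly Char order (code points).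
def bRun (num : Int) (prev : Option Char) (run : Int) (rest : List Char) : Bool :=
  match rest with
  | [] => false
  | ch :: t =>
    let r := if some ch == prev then run + 1 else 1
    if num ≤ r then true else bRun num (some ch) r t

def findMultiAlphaWords_alt (wordlist : List String) (num : Int) : List String :=
  wordlist.foldl (fun result word =>
    let chars := PySem.List.sorted (PySem.Str.lower word).toList (fun c => c) false
    if bRun num none 0 chars then result ++ [word] else result) []

-- ===== PRECONDITION & SPEC =====
def Spec_findMultiAlphaWords (wordlist : List String) (num : Int) (out : List String) : Prop := out = findMultiAlphaWords_alt wordlist num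
instance (wordlist : List String) (num : Int) (out : List String) : Decidable (Spec_findMultiAlphaWords wordlist num out) := by unfold Spec_findMultiAlphaWords; infer_instance

-- ===== CLAIM (what is proved, stated in full; the proofs are below) =====
def Claim_equal_findMultiAlphaWords : Prop := ∀ (wordlist : List String) (num : Int), Dom_findMultiAlphaWords wordlist num → Spec_findMultiAlphaWords wordlist num (findMultiAlphaWords wordlist num)

-- ===== LEMMAS AND PROOFS =====

lemma cnt_ne {j c : Char} (t : List Char) (h : j ≠ c) : (c :: t).count j = t.count j := by
  simp [List.count_cons]
  exact Ne.symm h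

lemma cnt_self (c : Char) (t : List Char) : (c :: t).count c = t.count c + 1 := by
  simp

-- A's inner loop with break is a List.any over the word's characters
lemma aCheck_eq_any (rest a : List Char) (num : Int) :
    aCheck rest a num = rest.any (fun j => num ≤ (a.count j : Int)) := by
  induction rest with
  | nil => rfl
  | cons j t ih =>
    simp only [aCheck, PySem.List.count_eq, List.any_cons, ih]
    split <;> simp_all

-- core: on a sorted list, the run-scan fires iff some character's count reaches num.
-- Part 1 is the statement for a fresh scan; part 2 is the invariant after r copies of c.
lemma bRun_core (num : Int) : ∀ (n : Nat) (s : List Char), s.length = n →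
    (s.Pairwise (· ≤ ·) → bRun num none 0 s = s.any (fun j => decide (num ≤ (s.count j : Int)))) ∧
    (∀ (c : Char) (r : Int), (c :: s).Pairwise (· ≤ ·) →
      bRun num (some c) r s =
        (decide (c ∈ s ∧ num ≤ r + (s.count c : Int)) ||
         s.any (fun j => decide (j ≠ c) && decide (num ≤ (s.count j : Int))))) := by
  intro n
  induction n using Nat.strong_induction_on with
  | _ n IH =>
    intro s hlen
    have part1 : s.Pairwise (· ≤ ·) → bRun num none 0 s = s.any (fun j => decide (num ≤ (s.count j : Int))) := by
      intro hsort
      match s, hlen with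
      | [], _ => rfl
      | c :: rest, hlen =>
        have hr : rest.length = n - 1 := by simp at hlen; omega
        have hlt : n - 1 < n := by simp at hlen; omega
        have IH2 := (IH (n - 1) hlt rest hr).2 c 1 hsort
        show (if num ≤ (1 : Int) then true else bRun num (some c) 1 rest) = _
        by_cases h1 : num ≤ (1 : Int)
        · have h0 : (0 : Int) ≤ (rest.count c : Int) := by positivity
          have : num ≤ ((c :: rest).count c : Int) := by rw [cnt_self]; push_cast; omega
          simp only [if_pos h1, List.any_cons, this, decide_true, Bool.true_or]
        · simp only [if_neg h1, IH2]
          rw [Bool.eq_iff_iff]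
          simp only [Bool.or_eq_true, List.any_eq_true, decide_eq_true_eq, Bool.and_eq_true,
            List.any_cons]
          constructor
          · rintro (⟨hc, hb⟩ | ⟨j, hj, hne, hb⟩)
            · left; rw [cnt_self]; push_cast; omega
            · right; exact ⟨j, hj, by rwa [cnt_ne rest hne]⟩
          · rintro (hb | ⟨j, hj, hb⟩)
            · rw [cnt_self] at hb; push_cast at hb
              have hmem : c ∈ rest := by
                rw [← List.count_pos_iff]; omega
              exact Or.inl ⟨hmem, by omega⟩
            · by_cases hjc : j = c
              · subst hjc
                rw [cnt_self] at hb; push_cast at hb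
                have hmem : j ∈ rest := by rw [← List.count_pos_iff]; omega
                exact Or.inl ⟨hmem, by omega⟩
              · rw [cnt_ne rest hjc] at hb
                exact Or.inr ⟨j, hj, hjc, hb⟩
    refine ⟨part1, ?_⟩
    intro c r hsort
    match s, hlen with
    | [], _ => simp [bRun]
    | d :: t, hlen =>
      have ht : t.length = n - 1 := by simp at hlen; omega
      have hlt : n - 1 < n := by simp at hlen; omega
      by_cases hdc : d = c
      · subst hdc
        have hsort' : (d :: t).Pairwise (· ≤ ·) := hsort.tail
        have IH2 := (IH (n - 1) hlt t ht).2 d (r + 1) hsort'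
        show (if num ≤ (if some d == some d then r + 1 else 1) then true
              else bRun num (some d) (if some d == some d then r + 1 else 1) t) = _
        simp only [BEq.rfl, if_true]
        by_cases h1 : num ≤ r + 1
        · have h0 : (0 : Int) ≤ (t.count d : Int) := by positivity
          have hb : num ≤ r + ((d :: t).count d : Int) := by rw [cnt_self]; push_cast; omega
          have hm : d ∈ d :: t := List.mem_cons_self
          simp only [if_pos h1, hm, hb, and_self, decide_true, Bool.true_or]
        · simp only [if_neg h1, IH2]
          rw [Bool.eq_iff_iff]
          simp only [Bool.or_eq_true, List.any_eq_true, decide_eq_true_eq, Bool.and_eq_true,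
            List.any_cons, List.mem_cons]
          constructor
          · rintro (⟨hc, hb⟩ | ⟨j, hj, hne, hb⟩)
            · left
              refine ⟨by simp, ?_⟩
              rw [cnt_self]; push_cast; omega
            · right; right
              exact ⟨j, hj, hne, by rwa [cnt_ne t hne]⟩
          · rintro (⟨_, hb⟩ | (⟨hne, _⟩ | ⟨j, hj, hne, hb⟩))
            · rw [cnt_self] at hb; push_cast at hb
              have hmem : d ∈ t := by rw [← List.count_pos_iff]; omega
              exact Or.inl ⟨hmem, by omega⟩
            · exact absurd rfl hne
            · rw [cnt_ne t hne] at hb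
              exact Or.inr ⟨j, hj, hne, hb⟩
      · -- d ≠ c: prev never matches again (sortedness: c < d ≤ everything), scan restarts fresh
        have hsort' : (d :: t).Pairwise (· ≤ ·) := hsort.tail
        have hcd : c ≤ d := (List.pairwise_cons.mp hsort).1 d (List.mem_cons_self)
        have hnotin : c ∉ d :: t := by
          intro hmem
          rcases List.mem_cons.mp hmem with h | h
          · exact hdc h.symm
          · have : d ≤ c := (List.pairwise_cons.mp hsort').1 c h
            exact hdc (le_antisymm this hcd)
        have hbne : (some d == some c) = false := by
          rw [beq_eq_false_iff_ne]
          simp only [ne_eq, Option.some.injEq]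
          exact hdc
        show (if num ≤ (if some d == some c then r + 1 else 1) then true
              else bRun num (some d) (if some d == some c then r + 1 else 1) t) = _
        simp only [hbne, Bool.false_eq_true, if_false]
        have lhs_eq : (if num ≤ (1 : Int) then true else bRun num (some d) 1 t)
            = bRun num none 0 (d :: t) := by
          rfl
        rw [lhs_eq, part1 hsort']
        rw [Bool.eq_iff_iff]
        simp only [Bool.or_eq_true, List.any_eq_true, decide_eq_true_eq, Bool.and_eq_true]
        constructor
        · rintro ⟨j, hj, hb⟩
          right
          refine ⟨j, hj, fun hjc => hnotin (hjc ▸ hj), hb⟩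
        · rintro (⟨hc, _⟩ | ⟨j, hj, _, hb⟩)
          · exact absurd hc hnotin
          · exact ⟨j, hj, hb⟩

-- per word: B's sort + run-scan equals A's break-scan
lemma perWord (a : List Char) (num : Int) :
    bRun num none 0 (PySem.List.sorted a (fun c => c) false) = aCheck a a num := by
  set s := PySem.List.sorted a (fun c => c) false with hs
  have hperm : s.Perm a := PySem.List.sorted_perm a (fun c => c) false
  have hsort : s.Pairwise (· ≤ ·) := PySem.List.sorted_pairwise a (fun c => c)
  rw [(bRun_core num s.length s rfl).1 hsort, aCheck_eq_any]
  rw [Bool.eq_iff_iff]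
  simp only [List.any_eq_true, decide_eq_true_eq]
  constructor
  · rintro ⟨j, hj, hb⟩
    exact ⟨j, hperm.mem_iff.mp hj, by rwa [hperm.count_eq] at hb⟩
  · rintro ⟨j, hj, hb⟩
    exact ⟨j, hperm.mem_iff.mpr hj, by rwa [hperm.count_eq]⟩

-- ===== VERDICT (by name: the statement is the Claim_ definition above) =====
theorem findMultiAlphaWords_spec : Claim_equal_findMultiAlphaWords := by
  intro wordlist num _
  unfold Spec_findMultiAlphaWords findMultiAlphaWords findMultiAlphaWords_alt
  rw [PySem.List.slice_none_none]
  exact congrArg (fun f => List.foldl f ([] : List String) wordlist)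
    (funext fun acc => funext fun i => by simp only [perWord])
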